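-- pv_equiv track=rewrite | github.com/tirthasg/Data-Structures-And-Algorithms | Combinatorial-Enumeration/Subsets/12_ordered_subsequences_of_a_list.py | ordered_subsequences
-- ===== SOURCE A (Python) =====
-- def ordered_subsequences(nums):
--     def helper(nums, i, slate):
--         result.append(slate[:])
--
--         if i == len(nums):
--             return
--
--         for pick in range(i, len(nums)):
--             slate.append(nums[pick])
--             helper(nums, pick + 1, slate)
--             slate.pop()
--
--     result = []
--     helper(nums, 0, [])
--     return result
-- ===== SOURCE B (Python) =====
-- def ordered_subsequences(nums):
--     result = []
--     stack = [(nums, [])]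
--     while stack:
--         rest, slate = stack.pop()
--         result.append(slate)
--         children = []
--         while rest:
--             x, rest = rest[0], rest[1:]
--             children.append((rest, slate + [x]))
--         stack.extend(reversed(children))
--     return result
-- ===== Notes on version B (the rewrite author's own statement) =====
-- stated objective: alternative
-- what changed: Replaced the mutating recursive backtracking helper with an iterative explicit-stack pre-order DFS whose states are (remaining suffix, fresh slate) pairs, pushing children in reverse so pop order matches A's output order.
import Mathlib
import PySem

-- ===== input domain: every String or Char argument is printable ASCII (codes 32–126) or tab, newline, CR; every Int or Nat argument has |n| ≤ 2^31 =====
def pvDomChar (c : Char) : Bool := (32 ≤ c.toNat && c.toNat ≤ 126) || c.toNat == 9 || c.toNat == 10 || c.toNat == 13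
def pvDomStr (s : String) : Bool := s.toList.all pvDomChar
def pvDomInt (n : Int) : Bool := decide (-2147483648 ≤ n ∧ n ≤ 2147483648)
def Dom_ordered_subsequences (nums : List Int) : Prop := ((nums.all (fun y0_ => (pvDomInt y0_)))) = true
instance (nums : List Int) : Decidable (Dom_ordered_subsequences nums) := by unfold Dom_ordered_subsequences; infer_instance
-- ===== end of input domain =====

-- B replaces A's mutating recursive backtracking with an iterative explicit-stack DFS over
-- (remaining-suffix, slate) states; same output value, no speed claim.

-- ===== PORT A =====
-- A's recursive helper plus its inner `for pick in range(i, len(nums))` loop, as a mutual pair: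
-- helperA_ordsub is `helper` (append slate copy, stop at i == len), forA_ordsub is the for-loop
-- from `pick` upward, each iteration contributing that recursive call's appends in order.
mutual
def helperA_ordsub (nums : List Int) (i : Int) (slate : List Int) : List (List Int) :=
  if i = (nums.length : Int) then [slate]
  else slate :: forA_ordsub nums i slate
  termination_by 2 * ((nums.length : Int) - i).toNat + 1
  decreasing_by omega
def forA_ordsub (nums : List Int) (pick : Int) (slate : List Int) : List (List Int) :=
  if pick < (nums.length : Int) then
    -- slate.append(nums[pick]); helper(nums, pick+1, slate); slate.pop()
    helperA_ordsub nums (pick + 1) (slate ++ [PySem.List.pyGetD nums pick 0]) ++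
      forA_ordsub nums (pick + 1) slate
  else []
  termination_by 2 * ((nums.length : Int) - pick).toNat
  decreasing_by
  · omega
  · omega
end

def ordered_subsequences (nums : List Int) : List (List Int) :=
  helperA_ordsub nums 0 []

-- ===== PORT B =====
-- inner `while rest:` loop of Source B: the list of child states of a popped (rest, slate) state,
-- in the order they will be popped (child k = (rest[k+1:], slate + [rest[k]])).
def childStates_ordsub : List Int → List Int → List (List Int × List Int)
  | [], _ => []
  | x :: xs, slate => (xs, slate ++ [x]) :: childStates_ordsub xs slate

-- termination measure for the stack loop: each state costs 2^(length of its remaining suffix)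
def stMeasure_ordsub (stack : List (List Int × List Int)) : Nat :=
  (stack.map (fun st => 2 ^ st.1.length)).sum

theorem stMeasure_childStates (rest slate : List Int) :
    stMeasure_ordsub (childStates_ordsub rest slate) = 2 ^ rest.length - 1 := by
  induction rest generalizing slate with
  | nil => simp [childStates_ordsub, stMeasure_ordsub]
  | cons x xs ih =>
    simp only [childStates_ordsub, stMeasure_ordsub, List.map_cons, List.sum_cons,
      List.length_cons] at *
    rw [ih]
    have : 0 < 2 ^ xs.length := Nat.two_pow_pos _
    ring_nf
    omega

theorem stMeasure_append (a b : List (List Int × List Int)) :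
    stMeasure_ordsub (a ++ b) = stMeasure_ordsub a + stMeasure_ordsub b := by
  simp [stMeasure_ordsub]

-- `while stack:` loop of Source B. The Lean stack is the Python list reversed (head = top of stack),
-- so Python's `stack.pop()` is taking the head and `stack.extend(reversed(children))` is
-- prepending the children in order.
def loopB_ordsub (stack : List (List Int × List Int)) (result : List (List Int)) :
    List (List Int) :=
  match stack with
  | [] => result
  | (rest, slate) :: stk =>
    loopB_ordsub (childStates_ordsub rest slate ++ stk) (result ++ [slate])
termination_by stMeasure_ordsub stack
decreasing_by
  simp only [stMeasure_ordsub, List.map_cons, List.sum_cons]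
  rw [show ((childStates_ordsub rest slate ++ stk).map (fun st => 2 ^ st.1.length)).sum
        = stMeasure_ordsub (childStates_ordsub rest slate ++ stk) from rfl,
      stMeasure_append, stMeasure_childStates]
  have : 0 < 2 ^ rest.length := Nat.two_pow_pos _
  simp only [stMeasure_ordsub]
  omega

def ordered_subsequences_alt (nums : List Int) : List (List Int) :=
  loopB_ordsub [(nums, [])] []

-- ===== PRECONDITION & SPEC =====
def Spec_ordered_subsequences (nums : List Int) (out : List (List Int)) : Prop := out = ordered_subsequences_alt nums
instance (nums : List Int) (out : List (List Int)) : Decidable (Spec_ordered_subsequences nums out) := by unfold Spec_ordered_subsequences; infer_instance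

-- ===== CLAIM (what is proved, stated in full; the proofs are below) =====
def Claim_equal_ordered_subsequences : Prop := ∀ (nums : List Int), Dom_ordered_subsequences nums → Spec_ordered_subsequences nums (ordered_subsequences nums)

-- ===== LEMMAS AND PROOFS =====

-- common reference function: all ordered subsequences drawn from `rest`, each extending `slate`,
-- in A's pre-order (excluding `slate` itself)
def G_ordsub : List Int → List Int → List (List Int)
  | [], _ => []
  | x :: xs, slate =>
    ((slate ++ [x]) :: G_ordsub xs (slate ++ [x])) ++ G_ordsub xs slate

theorem forA_eq_G (rest : List Int) :
    ∀ (nums : List Int) (pick : Int) (slate : List Int), 0 ≤ pick →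
    rest = nums.drop pick.toNat → forA_ordsub nums pick slate = G_ordsub rest slate := by
  induction rest with
  | nil =>
    intro nums pick slate hp hd
    have hlen : nums.length ≤ pick.toNat := by
      by_contra h
      exact absurd hd.symm (by simp [List.drop_eq_nil_iff]; omega)
    rw [forA_ordsub.eq_def, if_neg (by omega)]
    rfl
  | cons x xs ih =>
    intro nums pick slate hp hd
    have hlt : pick.toNat < nums.length := by
      by_contra h
      rw [List.drop_eq_nil_of_le (by omega)] at hd
      simp at hd
    have hx : nums[pick.toNat] = x := by
      have h0 : (nums.drop pick.toNat)[0]? = some x := by rw [← hd]; rfl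
      rw [List.getElem?_drop, List.getElem?_eq_getElem (by omega)] at h0
      simpa using h0
    have hxs : xs = nums.drop (pick + 1).toNat := by
      rw [show (pick + 1).toNat = pick.toNat + 1 by omega, ← List.tail_drop, ← hd]
      rfl
    have hget : PySem.List.pyGetD nums pick 0 = x := by
      rw [PySem.List.pyGetD_eq_getElem nums 0 hp (by omega), hx]
    have hhelper : ∀ s : List Int,
        helperA_ordsub nums (pick + 1) s = s :: G_ordsub xs s := by
      intro s
      rw [helperA_ordsub.eq_def]
      by_cases h : (pick + 1 : Int) = (nums.length : Int)
      · rw [if_pos h]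
        have : xs = [] := by
          rw [hxs, List.drop_eq_nil_of_le (by omega)]
        rw [this]; rfl
      · rw [if_neg h, ih nums (pick + 1) s (by omega) hxs]
    rw [forA_ordsub.eq_def, if_pos (by omega), hget, hhelper,
      ih nums (pick + 1) slate (by omega) hxs]
    rfl

theorem childStates_flatMap_eq_G (rest : List Int) :
    ∀ slate : List Int,
    (childStates_ordsub rest slate).flatMap (fun st => st.2 :: G_ordsub st.1 st.2)
      = G_ordsub rest slate := by
  induction rest with
  | nil => intro slate; rfl
  | cons x xs ih =>
    intro slate
    simp only [childStates_ordsub, List.flatMap_cons, G_ordsub, ih]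

theorem loopB_eq (stack : List (List Int × List Int)) (result : List (List Int)) :
    loopB_ordsub stack result
      = result ++ stack.flatMap (fun st => st.2 :: G_ordsub st.1 st.2) := by
  induction stack, result using loopB_ordsub.induct with
  | case1 result => simp [loopB_ordsub]
  | case2 rest slate stk result ih =>
    rw [loopB_ordsub, ih]
    simp only [List.flatMap_append, List.flatMap_cons, childStates_flatMap_eq_G,
      List.append_assoc, List.cons_append, List.nil_append]

-- ===== VERDICT (by name: the statement is the Claim_ definition above) =====
theorem ordered_subsequences_spec : Claim_equal_ordered_subsequences := by
  intro nums _
  unfold Spec_ordered_subsequences ordered_subsequences ordered_subsequences_alt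
  rw [loopB_eq]
  simp only [List.flatMap_cons, List.flatMap_nil, List.append_nil, List.nil_append]
  rw [helperA_ordsub.eq_def]
  by_cases h : (0 : Int) = (nums.length : Int)
  · rw [if_pos h]
    have : nums = [] := by
      have : nums.length = 0 := by omega
      exact List.eq_nil_of_length_eq_zero this
    subst this; rfl
  · rw [if_neg h, forA_eq_G nums nums 0 [] le_rfl (by simp)]
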